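-- pv_equiv track=rewrite | github.com/jin-james/code_lbj | xiaoben_AS/0407Answer_sheet.py | is_add_pic
-- ===== SOURCE A (Python) =====
-- def is_add_pic(n, pic_in_sub):
--     flag = False
--     num = 0
--     for tmp in pic_in_sub:
--         if tmp:
--             flag = True if n >= num else False
--         num += 1
--     return flag
-- ===== SOURCE B (Python) =====
-- def is_add_pic(n, pic_in_sub):
--     j = len(pic_in_sub)
--     while j > 0:
--         j -= 1
--         if pic_in_sub[j]:
--             return n >= j
--     return False
-- ===== Notes on version B (the rewrite author's own statement) =====
-- stated objective: alternative
-- what changed: B scans the list BACKWARDS by index and returns early at the first truthy element (n >= its index), instead of A's forward pass that threads a mutable flag and counter over every element.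
import Mathlib
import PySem

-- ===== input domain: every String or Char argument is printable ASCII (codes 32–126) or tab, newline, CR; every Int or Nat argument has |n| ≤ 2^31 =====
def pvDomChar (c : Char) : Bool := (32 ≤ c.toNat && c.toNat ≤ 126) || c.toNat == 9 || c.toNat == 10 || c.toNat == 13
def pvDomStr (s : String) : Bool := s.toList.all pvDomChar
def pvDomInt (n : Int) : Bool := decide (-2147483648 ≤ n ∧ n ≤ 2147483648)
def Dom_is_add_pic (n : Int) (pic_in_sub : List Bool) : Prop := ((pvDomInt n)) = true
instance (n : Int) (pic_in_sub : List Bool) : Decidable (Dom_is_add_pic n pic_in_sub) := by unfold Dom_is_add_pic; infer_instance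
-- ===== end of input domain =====

-- B is an alternative: a backward index scan that returns early at the first truthy element, instead of A's forward flag-threading pass.


-- ===== PORT A =====
def is_add_pic (n : Int) (pic_in_sub : List Bool) : Bool :=
  (pic_in_sub.foldl
    (fun (s : Bool × Int) tmp =>
      (if tmp then (if n ≥ s.2 then true else false) else s.1, s.2 + 1))
    (false, 0)).1

-- ===== PORT B =====
-- B's while-loop: j counts down from len; the index j is always in range, so
-- pyGet? is always 'some' and '.getD false' is exact here.
def pvScanBack (n : Int) (l : List Bool) : Nat → Bool
  | 0 => false
  | j + 1 =>
      if (PySem.List.pyGet? l (j : Int)).getD false then decide (n ≥ (j : Int))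
      else pvScanBack n l j

def is_add_pic_alt (n : Int) (pic_in_sub : List Bool) : Bool :=
  pvScanBack n pic_in_sub pic_in_sub.length

-- ===== PRECONDITION & SPEC =====
def Spec_is_add_pic (n : Int) (pic_in_sub : List Bool) (out : Bool) : Prop := out = is_add_pic_alt n pic_in_sub
instance (n : Int) (pic_in_sub : List Bool) (out : Bool) : Decidable (Spec_is_add_pic n pic_in_sub out) := by unfold Spec_is_add_pic; infer_instance

-- ===== CLAIM (what is proved, stated in full; the proofs are below) =====
def Claim_equal_is_add_pic : Prop := ∀ (n : Int) (pic_in_sub : List Bool), Dom_is_add_pic n pic_in_sub → Spec_is_add_pic n pic_in_sub (is_add_pic n pic_in_sub)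

-- ===== LEMMAS AND PROOFS =====
-- A's counter after folding l from counter k is k + l.length.
theorem pv_fold_counter (n : Int) (l : List Bool) (f : Bool) (k : Int) :
    (l.foldl
      (fun (s : Bool × Int) tmp =>
        (if tmp then (if n ≥ s.2 then true else false) else s.1, s.2 + 1))
      (f, k)).2 = k + l.length := by
  induction l generalizing f k with
  | nil => simp
  | cons b t ih => rw [List.foldl_cons, ih]; simp; ring

-- Appending one element to A's input applies one more step of the fold.
theorem pv_fold_snoc (n : Int) (t : List Bool) (b : Bool) :
    is_add_pic n (t ++ [b]) =
      (if b then decide (n ≥ (t.length : Int)) else is_add_pic n t) := by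
  unfold is_add_pic
  rw [List.foldl_append]
  cases b with
  | false => simp
  | true =>
    simp only [List.foldl_cons, List.foldl_nil, if_pos]
    rw [pv_fold_counter]
    by_cases h : n ≥ (t.length : Int) <;> simp [h]

-- B's scan over indices below t.length ignores an appended element.
theorem pvScanBack_append (n : Int) (t : List Bool) (b : Bool) (j : Nat)
    (hj : j ≤ t.length) :
    pvScanBack n (t ++ [b]) j = pvScanBack n t j := by
  induction j with
  | zero => rfl
  | succ j ih =>
    have hlt : j < t.length := by omega
    unfold pvScanBack
    rw [ih (by omega)]
    have : PySem.List.pyGet? (t ++ [b]) (j : Int) = PySem.List.pyGet? t (j : Int) := by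
      simp [PySem.List.pyGet?_natCast, List.getElem?_append_left hlt]
    rw [this]

theorem pv_main (n : Int) (l : List Bool) :
    is_add_pic n l = is_add_pic_alt n l := by
  induction l using List.reverseRecOn with
  | nil => rfl
  | append_singleton t b ih =>
    rw [pv_fold_snoc]
    unfold is_add_pic_alt
    have hlen : (t ++ [b]).length = t.length + 1 := by simp
    rw [hlen]
    unfold pvScanBack
    have hget : PySem.List.pyGet? (t ++ [b]) (t.length : Int) = some b :=
      PySem.List.pyGet?_append_length t [] b
    rw [hget]
    cases b with
    | true => simp
    | false =>
      simp only [Option.getD_some, if_neg (by simp : ¬ (false = true))]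
      rw [pvScanBack_append n t false t.length le_rfl]
      exact ih

-- ===== VERDICT (by name: the statement is the Claim_ definition above) =====
theorem is_add_pic_spec : Claim_equal_is_add_pic := by
  intro n l _
  unfold Spec_is_add_pic
  exact pv_main n l
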